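-- pv_equiv track=rewrite | github.com/chiyc/advent-of-code-2023 | 13.py | find_mirror_positions
-- ===== SOURCE A (Python) =====
-- def check_vertical_reflection(mirror, mirror_col):
--     assert 1 <= mirror_col < len(mirror[0])
--     for row in mirror:
--         for j in range(mirror_col):
--             jr = mirror_col + (mirror_col - j - 1)
--             if jr < len(row) and row[j] != row[jr]:
--                 return False
--     return True
--
-- def check_horizontal_reflection(mirror, mirror_row):
--     assert 1 <= mirror_row < len(mirror)
--     for j in range(len(mirror[0])):
--         col = ''.join([mirror[i][j] for i, _ in enumerate(mirror)])
--         for i in range(mirror_row):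
--             ir = mirror_row + (mirror_row - i - 1)
--             if ir < len(mirror) and col[i] != col[ir]:
--                 return False
--     return True
--
-- def find_mirror_positions(mirror):
--     positions = []
--     for i in range(1, len(mirror)):
--         if check_horizontal_reflection(mirror, i):
--             positions.append((i, 0))
--
--     for j in range(1, len(mirror[0])):
--         if check_vertical_reflection(mirror, j):
--             positions.append((0, j))
--
--     return positions
-- ===== SOURCE B (Python) =====
-- def find_mirror_positions(mirror):
--     n = len(mirror)
--     width = len(mirror[0])
--     trunc = [row[:width] for row in mirror]
--     hbad = set()
--     for i in range(n):
--         for j in range(i + 1, n):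
--             if trunc[i] != trunc[j]:
--                 hbad.add(i + j)
--     vbad = set()
--     for row in mirror:
--         for a in range(len(row)):
--             for b in range(a + 1, len(row)):
--                 if row[a] != row[b]:
--                     vbad.add(a + b)
--     return [(p, 0) for p in range(1, n) if 2 * p - 1 not in hbad] + \
--            [(0, q) for q in range(1, width) if 2 * q - 1 not in vbad]
-- ===== Notes on version B (the rewrite author's own statement) =====
-- stated objective: faster
-- what changed: B makes one pass over all index pairs, recording every mismatching pair (rows truncated once to the first row's width, and per-row character pairs) in a 'bad anti-diagonal' set keyed by the pair's index sum, then reads off exactly the positions p whose diagonal 2p-1 has no recorded mismatch; A instead re-scans the grid per candidate, rebuilding every column string for each horizontal candidate.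
-- outside the precondition, e.g. on find_mirror_positions(['ab', 'b']): A returns [], B returns []
import Mathlib
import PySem

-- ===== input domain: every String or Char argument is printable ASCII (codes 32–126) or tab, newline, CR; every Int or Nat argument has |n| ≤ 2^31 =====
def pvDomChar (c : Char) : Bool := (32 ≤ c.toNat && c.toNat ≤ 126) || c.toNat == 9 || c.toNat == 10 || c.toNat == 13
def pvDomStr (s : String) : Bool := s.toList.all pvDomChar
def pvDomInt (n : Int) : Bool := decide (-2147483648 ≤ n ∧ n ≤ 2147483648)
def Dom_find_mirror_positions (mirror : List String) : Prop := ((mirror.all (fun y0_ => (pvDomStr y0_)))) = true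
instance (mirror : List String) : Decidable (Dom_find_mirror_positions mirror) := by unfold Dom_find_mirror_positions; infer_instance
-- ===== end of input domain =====

-- B records every mismatching pair of (truncated) rows and every mismatching in-row character
-- pair in a set keyed by the pair's index sum, then reads off the positions whose anti-diagonal
-- 2p-1 has no recorded mismatch, instead of A's per-candidate re-scan of the grid.

-- ===== PORT A =====
-- Python's guarded accesses row[j]/row[jr] are always in range when evaluated; the getD
-- defaults are never the returned value of an access Python performs.
def check_vertical_reflection (mirror : List String) (mirror_col : Int) : Bool :=
  mirror.all (fun row =>
    (PySem.List.pyRange 0 mirror_col 1).all (fun j =>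
      let jr := mirror_col + (mirror_col - j - 1)
      !(decide (jr < PySem.Str.len row) &&
        decide ((PySem.Str.pyGet? row j).getD ' ' ≠ (PySem.Str.pyGet? row jr).getD ' '))))

-- mirror[i][j] raises IndexError in Python when row i is shorter than row 0; the port pads
-- with ' ' there (such inputs are where A raises; no claim is made about them).
def check_horizontal_reflection (mirror : List String) (mirror_row : Int) : Bool :=
  (PySem.List.pyRange 0 (PySem.Str.len (mirror.headD "")) 1).all (fun j =>
    let col : List Char := mirror.map (fun row => (PySem.Str.pyGet? row j).getD ' ')
    (PySem.List.pyRange 0 mirror_row 1).all (fun i =>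
      let ir := mirror_row + (mirror_row - i - 1)
      !(decide (ir < (mirror.length : Int)) &&
        decide ((PySem.List.pyGet? col i).getD ' ' ≠ (PySem.List.pyGet? col ir).getD ' '))))

def find_mirror_positions (mirror : List String) : List (Int × Int) :=
  let positions := (PySem.List.pyRange 1 (mirror.length : Int) 1).foldl
    (fun acc i => if check_horizontal_reflection mirror i then acc ++ [(i, (0 : Int))] else acc) []
  (PySem.List.pyRange 1 (PySem.Str.len (mirror.headD "")) 1).foldl
    (fun acc j => if check_vertical_reflection mirror j then acc ++ [((0 : Int), j)] else acc) positions

-- ===== PORT B =====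
-- trunc = [row[:width] for row in mirror]  (row[:width] with width = len(mirror[0]) ≥ 0: exact)
def pvTruncL (mirror : List String) : List String :=
  mirror.map (fun row => String.ofList (row.toList.take (PySem.Str.len (mirror.headD "")).toNat))

-- hbad: for i<j with trunc[i] != trunc[j], add i+j (indices always in range in Source B)
def pvHbad (mirror : List String) : PySem.Set Int :=
  (PySem.List.pyRange 0 (mirror.length : Int) 1).foldl (fun s i =>
    (PySem.List.pyRange (i + 1) (mirror.length : Int) 1).foldl (fun s j =>
      if (PySem.List.pyGet? (pvTruncL mirror) i).getD "" ≠ (PySem.List.pyGet? (pvTruncL mirror) j).getD ""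
      then PySem.Set.add s (i + j) else s) s) PySem.Set.empty

-- vbad: for each row, for a<b with row[a] != row[b], add a+b
def pvVbad (mirror : List String) : PySem.Set Int :=
  mirror.foldl (fun s row =>
    (PySem.List.pyRange 0 (PySem.Str.len row) 1).foldl (fun s a =>
      (PySem.List.pyRange (a + 1) (PySem.Str.len row) 1).foldl (fun s b =>
        if (PySem.Str.pyGet? row a).getD ' ' ≠ (PySem.Str.pyGet? row b).getD ' '
        then PySem.Set.add s (a + b) else s) s) s) PySem.Set.empty

def find_mirror_positions_alt (mirror : List String) : List (Int × Int) :=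
  let n : Int := mirror.length
  let width : Int := PySem.Str.len (mirror.headD "")
  let hbad := pvHbad mirror
  let vbad := pvVbad mirror
  ((PySem.List.pyRange 1 n 1).filter (fun p => !(PySem.Set.contains hbad (2 * p - 1)))).map
      (fun p => (p, (0 : Int)))
  ++ ((PySem.List.pyRange 1 width 1).filter (fun q => !(PySem.Set.contains vbad (2 * q - 1)))).map
      (fun q => ((0 : Int), q))

-- ===== PRECONDITION & SPEC =====
-- Pre_ excludes the empty grid (A raises IndexError at mirror[0]) and grids in which some
-- row is shorter than the first row: there A raises IndexError at mirror[i][j] unless an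
-- earlier column mismatch happens to short-circuit the scan, which depends on the data.
def Pre_find_mirror_positions (mirror : List String) : Prop :=
  mirror ≠ [] ∧ ∀ row ∈ mirror, (mirror.headD "").toList.length ≤ row.toList.length
instance (mirror : List String) : Decidable (Pre_find_mirror_positions mirror) := by
  unfold Pre_find_mirror_positions; infer_instance

def pvWitness_find_mirror_positions : List String := ["#.", "#."]

def Spec_find_mirror_positions (mirror : List String) (out : List (Int × Int)) : Prop := out = find_mirror_positions_alt mirror
instance (mirror : List String) (out : List (Int × Int)) : Decidable (Spec_find_mirror_positions mirror out) := by unfold Spec_find_mirror_positions; infer_instance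

-- ===== CLAIM (what is proved, stated in full; the proofs are below) =====
def Claim_equal_find_mirror_positions : Prop := ∀ (mirror : List String), Dom_find_mirror_positions mirror → Pre_find_mirror_positions mirror → Spec_find_mirror_positions mirror (find_mirror_positions mirror)

-- ===== LEMMAS AND PROOFS =====

-- membership in a conditionally-adding fold
theorem pv_mem_foldl {ι : Type} (x : Int) (step : PySem.Set Int → ι → PySem.Set Int)
    (Q : ι → Prop) (h : ∀ s i, x ∈ step s i ↔ x ∈ s ∨ Q i) :
    ∀ (l : List ι) (s0 : PySem.Set Int), x ∈ l.foldl step s0 ↔ x ∈ s0 ∨ ∃ i ∈ l, Q i := by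
  intro l
  induction l with
  | nil => simp
  | cons a t ih =>
    intro s0
    rw [List.foldl_cons, ih, h]
    simp only [List.mem_cons]
    constructor
    · rintro ((hs | hq) | ⟨i, hi, hQ⟩)
      · exact Or.inl hs
      · exact Or.inr ⟨a, Or.inl rfl, hq⟩
      · exact Or.inr ⟨i, Or.inr hi, hQ⟩
    · rintro (hs | ⟨i, (rfl | hi), hQ⟩)
      · exact Or.inl (Or.inl hs)
      · exact Or.inl (Or.inr hQ)
      · exact Or.inr ⟨i, hi, hQ⟩

theorem pv_mem_hbad (mirror : List String) (x : Int) :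
    x ∈ pvHbad mirror ↔ ∃ i j : Int, 0 ≤ i ∧ i < j ∧ j < (mirror.length : Int) ∧
      (PySem.List.pyGet? (pvTruncL mirror) i).getD "" ≠ (PySem.List.pyGet? (pvTruncL mirror) j).getD "" ∧
      i + j = x := by
  unfold pvHbad
  rw [pv_mem_foldl x _
    (fun i => ∃ j ∈ PySem.List.pyRange (i + 1) (mirror.length : Int) 1,
      ((PySem.List.pyGet? (pvTruncL mirror) i).getD "" ≠ (PySem.List.pyGet? (pvTruncL mirror) j).getD "" ∧ i + j = x))
    (fun s i => pv_mem_foldl x _ _ (fun s j => by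
      split_ifs with hne
      · rw [PySem.Set.mem_add]; tauto
      · tauto) _ s)]
  simp only [PySem.Set.empty, List.not_mem_nil, false_or, PySem.List.mem_pyRange_one]
  constructor
  · rintro ⟨i, ⟨hi0, hin⟩, j, ⟨hij, hjn⟩, hne, hsum⟩
    exact ⟨i, j, hi0, by omega, hjn, hne, hsum⟩
  · rintro ⟨i, j, hi0, hij, hjn, hne, hsum⟩
    exact ⟨i, ⟨hi0, by omega⟩, j, ⟨by omega, hjn⟩, hne, hsum⟩

theorem pv_mem_vrow (row : String) (x : Int) (s0 : PySem.Set Int) :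
    x ∈ (PySem.List.pyRange 0 (PySem.Str.len row) 1).foldl (fun s a =>
      (PySem.List.pyRange (a + 1) (PySem.Str.len row) 1).foldl (fun s b =>
        if (PySem.Str.pyGet? row a).getD ' ' ≠ (PySem.Str.pyGet? row b).getD ' '
        then PySem.Set.add s (a + b) else s) s) s0 ↔
    x ∈ s0 ∨ ∃ a b : Int, 0 ≤ a ∧ a < b ∧ b < (row.toList.length : Int) ∧
      (PySem.Str.pyGet? row a).getD ' ' ≠ (PySem.Str.pyGet? row b).getD ' ' ∧ a + b = x := by
  rw [pv_mem_foldl x _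
    (fun a => ∃ b ∈ PySem.List.pyRange (a + 1) (PySem.Str.len row) 1,
      ((PySem.Str.pyGet? row a).getD ' ' ≠ (PySem.Str.pyGet? row b).getD ' ' ∧ a + b = x))
    (fun s a => pv_mem_foldl x _ _ (fun s b => by
      split_ifs with hne
      · rw [PySem.Set.mem_add]; tauto
      · tauto) _ s)]
  simp only [PySem.List.mem_pyRange_one, PySem.Str.len_eq]
  constructor
  · rintro (hs | ⟨a, ⟨ha0, _⟩, b, ⟨hab, hbL⟩, hne, hsum⟩)
    · exact Or.inl hs
    · exact Or.inr ⟨a, b, ha0, by omega, hbL, hne, hsum⟩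
  · rintro (hs | ⟨a, b, ha0, hab, hbL, hne, hsum⟩)
    · exact Or.inl hs
    · exact Or.inr ⟨a, ⟨ha0, by omega⟩, b, ⟨by omega, hbL⟩, hne, hsum⟩

theorem pv_mem_vbad (mirror : List String) (x : Int) :
    x ∈ pvVbad mirror ↔ ∃ row ∈ mirror, ∃ a b : Int, 0 ≤ a ∧ a < b ∧ b < (row.toList.length : Int) ∧
      (PySem.Str.pyGet? row a).getD ' ' ≠ (PySem.Str.pyGet? row b).getD ' ' ∧ a + b = x := by
  unfold pvVbad
  rw [pv_mem_foldl x _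
    (fun row => ∃ a b : Int, 0 ≤ a ∧ a < b ∧ b < (row.toList.length : Int) ∧
      (PySem.Str.pyGet? row a).getD ' ' ≠ (PySem.Str.pyGet? row b).getD ' ' ∧ a + b = x)
    (fun s row => pv_mem_vrow row x s)]
  simp only [PySem.Set.empty, List.not_mem_nil, false_or]

theorem pvMapGet {α β : Type} (xs : List α) (f : α → β) (d : α) (d' : β) (i : Int)
    (hi0 : 0 ≤ i) (hin : i.toNat < xs.length) :
    (PySem.List.pyGet? (xs.map f) i).getD d' = f (xs.getD i.toNat d) := by
  rw [PySem.List.pyGet?_of_nonneg (xs.map f) hi0]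
  simp [hin, List.getD_eq_getElem?_getD]

theorem pvStrExt (L : Nat) (a b : String) (ha : a.toList.length = L) (hb : b.toList.length = L) :
    a = b ↔ ∀ j, j < L → a.toList.getD j ' ' = b.toList.getD j ' ' := by
  constructor
  · intro h j hj; rw [h]
  · intro h
    have : a.toList = b.toList := by
      apply List.ext_getElem (by rw [ha, hb])
      intro i h1 h2
      have := h i (by omega)
      rwa [List.getD_eq_getElem _ _ h1, List.getD_eq_getElem _ _ h2] at this
    calc a = String.ofList a.toList := (String.ofList_toList (s := a)).symm
    _ = String.ofList b.toList := by rw [this]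
    _ = b := String.ofList_toList (s := b)

theorem pvTakeLen (W : Nat) (row : String) (h : W ≤ row.toList.length) :
    (String.ofList (row.toList.take W)).toList.length = W := by
  simp only [String.toList_ofList, List.length_take]
  omega

theorem pvTakeGet (W : Nat) (row : String) (j : Nat) (hj : j < W) :
    (String.ofList (row.toList.take W)).toList.getD j ' ' = (PySem.Str.pyGet? row (j : Int)).getD ' ' := by
  simp only [String.toList_ofList, PySem.Str.pyGet?_eq, PySem.Chars.pyGet?_eq_listPyGet?,
    PySem.List.pyGet?_natCast, List.getD_eq_getElem?_getD, List.getElem?_take, if_pos hj]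

-- A's horizontal check at p ↔ no mismatching truncated-row pair on anti-diagonal 2p-1
theorem pvH_char (mirror : List String)
    (hpre : ∀ row ∈ mirror, (mirror.headD "").toList.length ≤ row.toList.length)
    (p : Int) (h1 : 1 ≤ p) (h2 : p < (mirror.length : Int)) :
    check_horizontal_reflection mirror p = true ↔
      ∀ i j : Int, 0 ≤ i → i < j → j < (mirror.length : Int) → i + j = 2 * p - 1 →
        (PySem.List.pyGet? (pvTruncL mirror) i).getD "" = (PySem.List.pyGet? (pvTruncL mirror) j).getD "" := by
  have hW : (PySem.Str.len (mirror.headD "")).toNat = (mirror.headD "").toList.length := by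
    simp [PySem.Str.len_eq]
  have hlen : ∀ i : Int, 0 ≤ i → i < (mirror.length : Int) →
      (mirror.headD "").toList.length ≤ (mirror.getD i.toNat "").toList.length := by
    intro i hi0 hin
    apply hpre
    rw [List.getD_eq_getElem _ _ (by omega)]
    exact List.getElem_mem _
  have htget : ∀ i : Int, 0 ≤ i → i < (mirror.length : Int) →
      (PySem.List.pyGet? (pvTruncL mirror) i).getD "" =
        String.ofList ((mirror.getD i.toNat "").toList.take (mirror.headD "").toList.length) := by
    intro i hi0 hin
    unfold pvTruncL
    rw [pvMapGet mirror _ "" "" i hi0 (by omega), hW]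
  simp only [check_horizontal_reflection, List.all_eq_true, PySem.List.mem_pyRange_one,
    Bool.not_eq_true', Bool.and_eq_false_iff, decide_eq_false_iff_not, not_not, and_imp,
    not_lt, PySem.Str.len_eq]
  constructor
  · intro hA i j hi0 hij hjn hsum
    rw [htget i hi0 (by omega), htget j (by omega) hjn]
    rw [pvStrExt (mirror.headD "").toList.length _ _
      (pvTakeLen _ _ (hlen i hi0 (by omega))) (pvTakeLen _ _ (hlen j (by omega) hjn))]
    intro j0 hj0
    rw [pvTakeGet _ _ j0 hj0, pvTakeGet _ _ j0 hj0]
    have := hA (j0 : Int) (by omega) (by exact_mod_cast hj0) i hi0 (by omega)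
    rcases this with hbad | this
    · omega
    rw [pvMapGet mirror _ "" ' ' i hi0 (by omega),
        pvMapGet mirror _ "" ' ' (p + (p - i - 1)) (by omega) (by omega)] at this
    rw [show p + (p - i - 1) = j by omega] at this
    exact this
  · intro hB j0 hj00 hj0W i hi0 hip
    by_cases hg : (mirror.length : Int) ≤ p + (p - i - 1)
    · exact Or.inl hg
    right
    have hij : i < p + (p - i - 1) := by omega
    have := hB i (p + (p - i - 1)) hi0 hij (by omega) (by omega)
    rw [htget i hi0 (by omega), htget (p + (p - i - 1)) (by omega) (by omega)] at this
    rw [pvStrExt (mirror.headD "").toList.length _ _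
      (pvTakeLen _ _ (hlen i hi0 (by omega))) (pvTakeLen _ _ (hlen (p + (p - i - 1)) (by omega) (by omega)))] at this
    have hj0N : j0.toNat < (mirror.headD "").toList.length := by omega
    have hc := this j0.toNat hj0N
    rw [pvTakeGet _ _ j0.toNat hj0N, pvTakeGet _ _ j0.toNat hj0N] at hc
    rw [pvMapGet mirror _ "" ' ' i hi0 (by omega),
        pvMapGet mirror _ "" ' ' (p + (p - i - 1)) (by omega) (by omega)]
    rw [show ((j0.toNat : Nat) : Int) = j0 by omega] at hc
    exact hc

-- A's vertical check at q ↔ no mismatching character pair on anti-diagonal 2q-1 in any row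
theorem pvV_char (mirror : List String) (q : Int) :
    check_vertical_reflection mirror q = true ↔
      ∀ row ∈ mirror, ∀ a b : Int, 0 ≤ a → a < b → b < (row.toList.length : Int) → a + b = 2 * q - 1 →
        (PySem.Str.pyGet? row a).getD ' ' = (PySem.Str.pyGet? row b).getD ' ' := by
  simp only [check_vertical_reflection, List.all_eq_true, PySem.List.mem_pyRange_one,
    Bool.not_eq_true', Bool.and_eq_false_iff, decide_eq_false_iff_not, not_not, and_imp,
    not_lt, PySem.Str.len_eq]
  refine forall_congr' (fun row => forall_congr' (fun hrow => ?_))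
  constructor
  · intro hA a b ha0 hab hbL hsum
    have := hA a ha0 (by omega)
    rcases this with hbad | heq
    · omega
    rw [show q + (q - a - 1) = b by omega] at heq
    exact heq
  · intro hB a ha0 haq
    by_cases hg : (row.toList.length : Int) ≤ q + (q - a - 1)
    · exact Or.inl hg
    right
    exact hB a (q + (q - a - 1)) ha0 (by omega) (by omega) (by omega)

-- ===== VERDICT (by name: the statement is the Claim_ definition above) =====
theorem find_mirror_positions_spec : Claim_equal_find_mirror_positions := by
  intro mirror _hdom hpre
  obtain ⟨_hne, hrows⟩ := hpre
  unfold Spec_find_mirror_positions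
  simp only [find_mirror_positions, find_mirror_positions_alt]
  rw [PySem.List.foldl_append_if, PySem.List.foldl_append_if]
  simp only [List.nil_append]
  congr 1
  · congr 1
    apply List.filter_congr
    intro p hp
    rw [PySem.List.mem_pyRange_one] at hp
    have hchar := pvH_char mirror hrows p hp.1 hp.2
    have hmem := pv_mem_hbad mirror (2 * p - 1)
    by_cases hm : (2 * p - 1) ∈ pvHbad mirror
    · have hcb : PySem.Set.contains (pvHbad mirror) (2 * p - 1) = true :=
        List.elem_eq_true_of_mem hm
      rw [hcb]
      simp only [Bool.not_true]
      obtain ⟨i, j, hi0, hij, hjn, hne', hsum⟩ := hmem.mp hm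
      apply Bool.eq_false_iff.mpr
      intro habs
      exact hne' (hchar.mp habs i j hi0 hij hjn hsum)
    · have hcb : PySem.Set.contains (pvHbad mirror) (2 * p - 1) = false :=
        Bool.eq_false_iff.mpr (fun h => hm (List.mem_of_elem_eq_true h))
      rw [hcb]
      simp only [Bool.not_false]
      apply hchar.mpr
      intro i j hi0 hij hjn hsum
      by_contra hne'
      exact hm (hmem.mpr ⟨i, j, hi0, hij, hjn, hne', hsum⟩)
  · congr 1
    apply List.filter_congr
    intro q hq
    rw [PySem.List.mem_pyRange_one] at hq
    have hchar := pvV_char mirror q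
    have hmem := pv_mem_vbad mirror (2 * q - 1)
    by_cases hm : (2 * q - 1) ∈ pvVbad mirror
    · have hcb : PySem.Set.contains (pvVbad mirror) (2 * q - 1) = true :=
        List.elem_eq_true_of_mem hm
      rw [hcb]
      simp only [Bool.not_true]
      obtain ⟨row, hrow, a, b, ha0, hab, hbL, hne', hsum⟩ := hmem.mp hm
      apply Bool.eq_false_iff.mpr
      intro habs
      exact hne' (hchar.mp habs row hrow a b ha0 hab hbL hsum)
    · have hcb : PySem.Set.contains (pvVbad mirror) (2 * q - 1) = false :=
        Bool.eq_false_iff.mpr (fun h => hm (List.mem_of_elem_eq_true h))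
      rw [hcb]
      simp only [Bool.not_false]
      apply hchar.mpr
      intro row hrow a b ha0 hab hbL hsum
      by_contra hne'
      exact hm (hmem.mpr ⟨row, hrow, a, b, ha0, hab, hbL, hne', hsum⟩)
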